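-- pv_equiv track=rewrite | github.com/MeheretAl/python-practices | Leet/BadPairCount.py | badPairCount
-- ===== SOURCE A (Python) =====
-- from collections import defaultdict
--
-- def badPairCount(nums: list[int]) -> int:
--     goodCounter = 0
--     dict1 = defaultdict(int)
--     for i in range(len(nums)):
--         goodCounter += dict1[nums[i] - i]
--         dict1[nums[i] - i] += 1
--     size = len(nums)
--     totalPairs = int((size * (size - 1)) / 2)
--     return totalPairs - goodCounter
-- ===== SOURCE B (Python) =====
-- from collections import Counter
--
-- def badPairCount(nums: list[int]) -> int:
--     counts = Counter(x - i for i, x in enumerate(nums))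
--     good = sum(c * (c - 1) // 2 for c in counts.values())
--     size = len(nums)
--     totalPairs = int((size * (size - 1)) / 2)
--     return totalPairs - good
-- ===== Notes on version B (the rewrite author's own statement) =====
-- stated objective: alternative
-- what changed: Replaces A's running accumulator (adding the dict's current count at every index) with a Counter built in one pass followed by a closed-form combinations sum c*(c-1)//2 per group of equal nums[i]-i keys.
import Mathlib
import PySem

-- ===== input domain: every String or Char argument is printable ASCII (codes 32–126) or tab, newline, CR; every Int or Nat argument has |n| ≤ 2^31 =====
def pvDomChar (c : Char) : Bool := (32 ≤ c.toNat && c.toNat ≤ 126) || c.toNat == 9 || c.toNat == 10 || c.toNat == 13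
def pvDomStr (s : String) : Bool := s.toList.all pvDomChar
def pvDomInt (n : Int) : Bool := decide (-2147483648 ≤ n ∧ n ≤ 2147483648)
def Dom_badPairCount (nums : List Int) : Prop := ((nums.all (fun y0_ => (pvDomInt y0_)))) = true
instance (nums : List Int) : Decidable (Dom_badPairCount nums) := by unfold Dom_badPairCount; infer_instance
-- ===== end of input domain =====

-- B replaces A's running accumulator with a Counter plus a per-group combinations sum c*(c-1)//2 (alternative decomposition, same cost).


-- ===== PORT A =====
-- for i in range(len(nums)): goodCounter += dict1[nums[i]-i]; dict1[nums[i]-i] += 1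
-- (defaultdict read + store = getD / modify with default 0). The loop over range(len(nums))
-- indexing nums[i] is ported as a fold over enumerate(nums), the same (i, nums[i]) pairs.
-- int((size*(size-1))/2) is ported as exact integer division: size*(size-1) is even, so the
-- float quotient equals the integer quotient whenever size*(size-1) < 2^53.
def badPairCount (nums : List Int) : Int :=
  let p := (PySem.List.enumerate nums).foldl
      (fun (st : Int × PySem.Dict Int Int) iv =>
        (st.1 + st.2.getD (iv.2 - iv.1) 0, st.2.modify (iv.2 - iv.1) 0 (· + 1)))
      (0, PySem.Dict.empty)
  let size : Int := nums.length
  let totalPairs := PySem.Int.floordiv (size * (size - 1)) 2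
  totalPairs - p.1

-- ===== PORT B =====
-- counts = Counter(x - i for i, x in enumerate(nums)); good = sum(c*(c-1)//2 for c in counts.values())
def badPairCount_alt (nums : List Int) : Int :=
  let counts := PySem.Dict.counter ((PySem.List.enumerate nums).map (fun iv => iv.2 - iv.1))
  let good := (counts.values.map (fun c => PySem.Int.floordiv (c * (c - 1)) 2)).sum
  let size : Int := nums.length
  let totalPairs := PySem.Int.floordiv (size * (size - 1)) 2
  totalPairs - good

-- ===== PRECONDITION & SPEC =====
def Spec_badPairCount (nums : List Int) (out : Int) : Prop := out = badPairCount_alt nums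
instance (nums : List Int) (out : Int) : Decidable (Spec_badPairCount nums out) := by unfold Spec_badPairCount; infer_instance

-- ===== CLAIM (what is proved, stated in full; the proofs are below) =====
def Claim_equal_badPairCount : Prop := ∀ (nums : List Int), Dom_badPairCount nums → Spec_badPairCount nums (badPairCount nums)

-- ===== LEMMAS AND PROOFS =====

-- C(count,2), the per-group good-pair count
def pvF (l : List Int) (v : Int) : Int := (l.count v : Int) * ((l.count v : Int) - 1) / 2

-- the dict component of A's loop is independent of the running counter
lemma sndFold (l : List (Int × Int)) (g : Int) (d : PySem.Dict Int Int) :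
    (l.foldl (fun (st : Int × PySem.Dict Int Int) iv =>
        (st.1 + st.2.getD (iv.2 - iv.1) 0, st.2.modify (iv.2 - iv.1) 0 (· + 1))) (g, d)).2
      = (l.map (fun iv => iv.2 - iv.1)).foldl (fun d k => d.modify k 0 (· + 1)) d := by
  induction l generalizing g d with
  | nil => rfl
  | cons iv l ih => simp [List.foldl, ih]

-- a sum over the dedup list is a Finset sum
lemma sum_ofList_eq (l : List Int) (f : Int → Int) :
    ((PySem.Set.ofList l).map f).sum = ∑ v ∈ l.toFinset, f v := by
  rw [← Finset.sum_map_toList]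
  apply List.Perm.sum_eq
  apply List.Perm.map
  apply (List.perm_ext_iff_of_nodup (PySem.Set.nodup_ofList l) (Finset.nodup_toList _)).2
  intro v
  simp [PySem.Set.mem_ofList]

-- combinations step: C(c+1,2) = C(c,2) + c over Int ediv
lemma comb_step (c : Int) : (c + 1) * (c + 1 - 1) / 2 = c * (c - 1) / 2 + c := by
  have h : (c + 1) * (c + 1 - 1) = c * (c - 1) + c * 2 := by ring
  rw [h, Int.add_mul_ediv_right _ _ (by norm_num : (2:Int) ≠ 0)]

-- appending one key adds its previous multiplicity to the combinations sum
lemma sum_step (ks : List Int) (k : Int) :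
    ((PySem.Set.ofList (ks ++ [k])).map (pvF (ks ++ [k]))).sum
      = ((PySem.Set.ofList ks).map (pvF ks)).sum + (ks.count k : Int) := by
  rw [sum_ofList_eq, sum_ofList_eq]
  by_cases hk : k ∈ ks
  · have hfs : (ks ++ [k]).toFinset = ks.toFinset := by
      simp [List.toFinset_append]
      exact hk
    have hkfs : k ∈ ks.toFinset := List.mem_toFinset.2 hk
    rw [hfs, ← Finset.add_sum_erase _ (pvF (ks ++ [k])) hkfs,
        ← Finset.add_sum_erase _ (pvF ks) hkfs]
    have hterm : pvF (ks ++ [k]) k = pvF ks k + (ks.count k : Int) := by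
      unfold pvF
      rw [List.count_append, List.count_singleton]
      simp only [beq_self_eq_true, if_true]
      push_cast
      exact comb_step _
    have hrest : ∀ v ∈ ks.toFinset.erase k, pvF (ks ++ [k]) v = pvF ks v := by
      intro v hv
      have hne : k ≠ v := fun h => (Finset.mem_erase.1 hv).1 h.symm
      unfold pvF
      rw [List.count_append]
      simp [hne]
    rw [hterm, Finset.sum_congr rfl hrest]
    ring
  · have hc0 : ks.count k = 0 := List.count_eq_zero.2 hk
    have hfs : (ks ++ [k]).toFinset = insert k ks.toFinset := by
      simp [List.toFinset_append]
    rw [hfs, Finset.sum_insert (by simp [hk])]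
    have hterm : pvF (ks ++ [k]) k = 0 := by
      unfold pvF
      rw [List.count_append, hc0]
      simp
    have hrest : ∀ v ∈ ks.toFinset, pvF (ks ++ [k]) v = pvF ks v := by
      intro v hv
      have hne : k ≠ v := by
        rintro rfl; exact hk (List.mem_toFinset.1 hv)
      unfold pvF
      rw [List.count_append]
      simp [hne]
    rw [hterm, Finset.sum_congr rfl hrest, hc0]
    simp

-- A's accumulated goodCounter equals the per-group combinations sum
lemma goodA_eq (l : List (Int × Int)) :
    (l.foldl (fun (st : Int × PySem.Dict Int Int) iv =>
        (st.1 + st.2.getD (iv.2 - iv.1) 0, st.2.modify (iv.2 - iv.1) 0 (· + 1))) (0, PySem.Dict.empty)).1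
      = ((PySem.Set.ofList (l.map (fun iv => iv.2 - iv.1))).map
          (pvF (l.map (fun iv => iv.2 - iv.1)))).sum := by
  induction l using List.reverseRecOn with
  | nil => rfl
  | append_singleton l iv ih =>
    rw [List.foldl_append, List.map_append]
    simp only [List.foldl_cons, List.foldl_nil, List.map_cons, List.map_nil]
    rw [sndFold, PySem.Dict.getD_foldl_modify_add_one, PySem.Dict.getD_empty, ih, sum_step]
    ring

-- B's good sum, expressed over the dedup list of keys
lemma goodB_eq (ks : List Int) :
    ((PySem.Dict.counter ks).values.map (fun c => PySem.Int.floordiv (c * (c - 1)) 2)).sum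
      = ((PySem.Set.ofList ks).map (pvF ks)).sum := by
  rw [PySem.Dict.values_eq_map_keys _ (PySem.Dict.nodup_keys_counter ks) 0]
  rw [PySem.Dict.keys_counter, List.map_map]
  apply congrArg List.sum
  apply List.map_congr_left
  intro v hv
  simp only [Function.comp]
  rw [PySem.Dict.getD_counter, pvF]
  rw [PySem.Int.floordiv_eq_ediv_of_pos (by norm_num)]

-- ===== VERDICT (by name: the statement is the Claim_ definition above) =====
theorem badPairCount_spec : Claim_equal_badPairCount := by
  intro nums _
  unfold Spec_badPairCount badPairCount badPairCount_alt
  simp only []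
  rw [goodA_eq, goodB_eq]
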